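-- pv_equiv track=rewrite | github.com/RonaldLi1981/VEHelperTitleOnly | tool_mib_word_split.py | mibWordSplit
-- ===== SOURCE A (Python) =====
-- def mibWordSplit(mib):
--     if mib == 'WiFi':
--         return mib
--
--     capital_char_index = [0]
--     for i in range(1, len(mib)):
--         if (mib[i].isupper() or mib[i].isdigit()):
--             if (capital_char_index[-1] +1 != i):
--                 capital_char_index.append (i)
--
--     seperated_words = ''
--     for i in range(1, len(capital_char_index)):
--         seperated_words += mib[capital_char_index[i-1]:capital_char_index[i]] + ' '
--
--     seperated_words = seperated_words[0:(len(seperated_words)-1)]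
--
--     if seperated_words == '':
--         seperated_words = mib
--     return seperated_words
-- ===== SOURCE B (Python) =====
-- def mibWordSplit(mib):
--     # Streaming two-state automaton: a char is a word boundary iff it is
--     # upper/digit and the previous char was NOT a boundary (prev flag),
--     # no index list and no slicing; the output buffer is written directly
--     # with a space before each boundary, and `cut` remembers where the
--     # last (never-emitted) trailing word begins.
--     if mib == 'WiFi':
--         return mib
--     buf = []
--     cut = 0
--     prev = False
--     for ch in mib:
--         if not buf:
--             prev = True          # position 0 always starts a word
--         elif (ch.isupper() or ch.isdigit()) and not prev:
--             cut = len(buf)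
--             buf.append(' ')
--             prev = True
--         else:
--             prev = False
--         buf.append(ch)
--     result = ''.join(buf[:cut])
--     if result == '':
--         result = mib
--     return result
-- ===== Notes on version B (the rewrite author's own statement) =====
-- stated objective: alternative
-- what changed: A builds a list of boundary indices (comparing each candidate with the last stored index) and then joins slices between consecutive indices, stripping a trailing space; B is a streaming two-state automaton over the characters - a char starts a word iff it is upper/digit and the previous char did not - that writes the output buffer directly with spaces and remembers a cut position where the never-emitted trailing word begins, with no index list and no slicing.
import Mathlib
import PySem

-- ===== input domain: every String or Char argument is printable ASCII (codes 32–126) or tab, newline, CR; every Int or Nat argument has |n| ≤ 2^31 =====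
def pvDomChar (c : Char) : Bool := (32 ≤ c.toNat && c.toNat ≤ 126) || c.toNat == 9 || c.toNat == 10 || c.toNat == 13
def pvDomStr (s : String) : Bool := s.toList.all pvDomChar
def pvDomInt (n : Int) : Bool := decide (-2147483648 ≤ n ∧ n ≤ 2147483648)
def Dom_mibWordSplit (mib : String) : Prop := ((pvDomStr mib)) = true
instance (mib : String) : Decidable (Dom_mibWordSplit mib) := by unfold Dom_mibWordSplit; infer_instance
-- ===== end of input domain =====

-- B replaces A's boundary-index-list + slice-joining with a streaming two-state
-- automaton over the characters that writes the output buffer directly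
-- (objective: alternative; same behaviour, including the dropped trailing word).

-- ===== PORT A =====
-- first loop of A: collect boundary indices, starting from [0]
def mibCapIdx (cs : List Char) (n : Int) : List Int :=
  (PySem.List.pyRange 1 n 1).foldl
    (fun acc i =>
      if PySem.Chars.isupper (PySem.List.pyGetD cs i ' ')
          || PySem.Chars.isdigit (PySem.List.pyGetD cs i ' ') then
        if PySem.List.pyGetD acc (-1) 0 + 1 ≠ i then acc ++ [i] else acc
      else acc)
    [0]

-- second loop of A: concatenate slices between consecutive indices, each followed by ' '
def mibJoinIdx (cs : List Char) (idx : List Int) : List Char :=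
  (PySem.List.pyRange 1 (idx.length : Int) 1).foldl
    (fun sep i =>
      sep ++ PySem.List.slice cs (some (PySem.List.pyGetD idx (i - 1) 0))
                                 (some (PySem.List.pyGetD idx i 0)) ++ [' '])
    []

def mibWordSplit (mib : String) : String :=
  if mib = "WiFi" then mib
  else
    let cs := mib.toList
    let idx := mibCapIdx cs (cs.length : Int)
    let sep := mibJoinIdx cs idx
    let sep2 := PySem.List.slice sep (some 0) (some ((sep.length : Int) - 1))
    String.ofList (if sep2 = [] then cs else sep2)

-- ===== PORT B =====
-- automaton state = (output buffer, cut position, "previous char was a boundary")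
def mibAltStep (st : List Char × Int × Bool) (ch : Char) : List Char × Int × Bool :=
  if st.1 = [] then (st.1 ++ [ch], st.2.1, true)
  else if (PySem.Chars.isupper ch || PySem.Chars.isdigit ch) && !st.2.2 then
    (st.1 ++ [' ', ch], (st.1.length : Int), true)
  else (st.1 ++ [ch], st.2.1, false)

def mibWordSplit_alt (mib : String) : String :=
  if mib = "WiFi" then mib
  else
    let cs := mib.toList
    let st := cs.foldl mibAltStep ([], 0, false)
    let result := PySem.List.slice st.1 none (some st.2.1)
    String.ofList (if result = [] then cs else result)

-- ===== PRECONDITION & SPEC =====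
def Spec_mibWordSplit (mib : String) (out : String) : Prop := out = mibWordSplit_alt mib
instance (mib : String) (out : String) : Decidable (Spec_mibWordSplit mib out) := by unfold Spec_mibWordSplit; infer_instance

-- ===== CLAIM (what is proved, stated in full; the proofs are below) =====
def Claim_equal_mibWordSplit : Prop := ∀ (mib : String), Dom_mibWordSplit mib → Spec_mibWordSplit mib (mibWordSplit mib)

-- ===== LEMMAS AND PROOFS =====

-- slices of adjacent pairs of an index list: the words A's second loop concatenates
def pvPairs (cs : List Char) : List Int → List (List Char)
  | [] => []
  | [_] => []
  | a :: b :: r => PySem.List.slice cs (some a) (some b) :: pvPairs cs (b :: r)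

lemma pvPairs_snoc (cs : List Char) (ys : List Int) (x z : Int) :
    pvPairs cs (ys ++ [x] ++ [z])
      = pvPairs cs (ys ++ [x]) ++ [PySem.List.slice cs (some x) (some z)] := by
  induction ys with
  | nil => rfl
  | cons a t ih =>
    cases t with
    | nil => rfl
    | cons b r => simp [pvPairs] at ih ⊢; exact ih

lemma pyGetD_nat_snoc_lt (ys : List Int) (z d : Int) (j : Nat) (hj : j < ys.length) :
    PySem.List.pyGetD (ys ++ [z]) (j : Int) d = PySem.List.pyGetD ys (j : Int) d := by
  rw [PySem.List.pyGetD_natCast, PySem.List.pyGetD_natCast]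
  simp [List.getD, List.getElem?_append_left hj]

-- A's second loop, as a flatMap, produces the pair-slices each followed by a space
lemma flatMap_pairs (cs : List Char) (idx : List Int) :
    (PySem.List.pyRange 1 (idx.length : Int) 1).flatMap
        (fun i => PySem.List.slice cs (some (PySem.List.pyGetD idx (i - 1) 0))
                                      (some (PySem.List.pyGetD idx i 0)) ++ [' '])
      = ((pvPairs cs idx).map (· ++ [' '])).flatten := by
  induction idx using List.reverseRecOn with
  | nil => rw [PySem.List.pyRange_one_eq_nil (by simp)]; rfl
  | append_singleton ys z ih =>
    rcases List.eq_nil_or_concat' ys with rfl | ⟨pre, x, rfl⟩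
    · rw [show ((([] : List Int) ++ [z]).length : Int) = 1 by simp,
          PySem.List.pyRange_one_eq_nil (by omega)]
      rfl
    · have hlen : (((pre ++ [x] ++ [z]).length : Nat) : Int)
          = (((pre ++ [x]).length : Nat) : Int) + 1 := by simp; ring
      rw [hlen, PySem.List.pyRange_one_succ_right (by simp),
          List.flatMap_append]
      have hcong : ∀ i ∈ PySem.List.pyRange 1 (((pre ++ [x]).length : Nat) : Int),
          (PySem.List.slice cs (some (PySem.List.pyGetD (pre ++ [x] ++ [z]) (i - 1) 0))
              (some (PySem.List.pyGetD (pre ++ [x] ++ [z]) i 0)) ++ [' '])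
            = (PySem.List.slice cs (some (PySem.List.pyGetD (pre ++ [x]) (i - 1) 0))
              (some (PySem.List.pyGetD (pre ++ [x]) i 0)) ++ [' ']) := by
        intro i hi
        rw [PySem.List.mem_pyRange_one] at hi
        obtain ⟨j, rfl⟩ : ∃ j : Nat, i = (j : Int) := ⟨i.toNat, by omega⟩
        obtain ⟨k, hk⟩ : ∃ k : Nat, j = k + 1 := ⟨j - 1, by omega⟩
        subst hk
        simp only [List.length_append, List.length_cons, List.length_nil] at hi
        have h1 : ((k + 1 : Nat) : Int) - 1 = (k : Int) := by push_cast; ring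
        rw [h1, pyGetD_nat_snoc_lt (pre ++ [x]) z 0 k (by simp at hi ⊢; omega),
            pyGetD_nat_snoc_lt (pre ++ [x]) z 0 (k + 1) (by simp at hi ⊢; omega)]
      rw [List.flatMap_congr hcong, ih, pvPairs_snoc]
      have hself' : PySem.List.pyGetD (pre ++ [x, z]) ((pre.length : Int) + 1) 0 = z := by
        have h : ((pre.length : Int) + 1) = (((pre.length + 1 : Nat)) : Int) := by push_cast; ring
        rw [h, PySem.List.pyGetD_natCast]; simp [List.getD]
      simp [hself']

-- A's second loop produces the concatenation of the pair-slices, each followed by a space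
lemma joinIdx_eq (cs : List Char) (idx : List Int) :
    mibJoinIdx cs idx = ((pvPairs cs idx).map (· ++ [' '])).flatten := by
  unfold mibJoinIdx
  have : ∀ (sep : List Char) (i : Int),
      sep ++ PySem.List.slice cs (some (PySem.List.pyGetD idx (i - 1) 0))
                                 (some (PySem.List.pyGetD idx i 0)) ++ [' ']
        = sep ++ (PySem.List.slice cs (some (PySem.List.pyGetD idx (i - 1) 0))
                                 (some (PySem.List.pyGetD idx i 0)) ++ [' ']) := by
    intro sep i; simp
  simp only [this]
  rw [PySem.List.foldl_append_eq_flatMap, List.nil_append]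
  exact flatMap_pairs cs idx

-- dropping the trailing character of w1·' '·w2·' '·… gives ' '.join(words)
lemma flatten_space_dropLast (ws : List (List Char)) :
    (((ws.map (· ++ [' '])).flatten)).dropLast = PySem.Chars.join [' '] ws := by
  induction ws with
  | nil => rfl
  | cons w rest ih =>
    cases rest with
    | nil => simp [PySem.Chars.join_singleton]
    | cons v r =>
      rw [PySem.Chars.join_cons_cons, ← ih]
      have hne : ((((v :: r).map (· ++ [' '])).flatten)) ≠ [] := by
        simp
      rw [List.map_cons, List.flatten_cons, List.dropLast_append_of_ne_nil hne]

-- sep[0:len(sep)-1] is dropLast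
lemma slice_pred_len (xs : List Char) :
    PySem.List.slice xs (some 0) (some ((xs.length : Int) - 1)) = xs.dropLast := by
  cases xs with
  | nil => rfl
  | cons a t =>
    have : ((a :: t).length : Int) - 1 = ((t.length : Nat) : Int) := by simp
    rw [this, PySem.List.slice_zero_start, PySem.List.slice_to_natCast]
    simp [List.dropLast_eq_take]

-- ' '.join of a snoc
lemma join_snoc (ws : List (List Char)) (t : List Char) (h : ws ≠ []) :
    PySem.Chars.join [' '] (ws ++ [t]) = PySem.Chars.join [' '] ws ++ ' ' :: t := by
  induction ws with
  | nil => exact absurd rfl h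
  | cons w rest ih =>
    cases rest with
    | nil => simp [PySem.Chars.join_singleton, PySem.Chars.join_cons_cons]
    | cons v r =>
      rw [show (w :: v :: r) ++ [t] = w :: v :: (r ++ [t]) from by simp,
          PySem.Chars.join_cons_cons, PySem.Chars.join_cons_cons,
          show (v :: (r ++ [t])) = (v :: r) ++ [t] from by simp, ih (by simp)]
      simp

-- extending a slice by one character on the right
lemma slice_extend (cs : List Char) (a : Int) (n : Nat) (h0 : 0 ≤ a) (han : a ≤ (n : Int))
    (hn : n < cs.length) :
    PySem.List.slice cs (some a) (some ((n : Int) + 1))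
      = PySem.List.slice cs (some a) (some (n : Int)) ++ [cs[n]] := by
  rw [PySem.List.slice_toNat cs h0 (by omega), PySem.List.slice_toNat cs h0 (by omega)]
  have h1 : ((n : Int) + 1).toNat = n + 1 := by omega
  have h2 : ((n : Int)).toNat = n := by omega
  rw [h1, h2]
  have hj : a.toNat ≤ n := by omega
  have hsub : n + 1 - a.toNat = (n - a.toNat) + 1 := by omega
  rw [hsub, List.take_add_one]
  have hidx : (cs.drop a.toNat)[n - a.toNat]? = some cs[n] := by
    rw [List.getElem?_drop, show a.toNat + (n - a.toNat) = n from by omega,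
        List.getElem?_eq_getElem hn]
  rw [hidx]
  rfl

-- the one-character slice cs[n:n+1]
lemma slice_one (cs : List Char) (n : Nat) (hn : n < cs.length) :
    PySem.List.slice cs (some (n : Int)) (some ((n : Int) + 1)) = [cs[n]] := by
  rw [PySem.List.slice_toNat cs (by omega) (by omega)]
  have h1 : ((n : Int) + 1).toNat = n + 1 := by omega
  have h2 : ((n : Int)).toNat = n := by omega
  rw [h1, h2, show n + 1 - n = 1 from by omega]
  exact List.take_one_drop_eq_of_lt_length hn

-- the last element of a snoc list, Python-style
lemma pyGetD_last_snoc (ys : List Int) (z d : Int) :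
    PySem.List.pyGetD (ys ++ [z]) (-1) d = z :=
  PySem.List.pyGetD_neg_one_append_singleton ys z d

-- A's index list is always a snoc with nonnegative last element < n
lemma capIdx_shape (cs : List Char) (n : Nat) (h1 : 1 ≤ n) :
    ∃ pre last, mibCapIdx cs (n : Int) = pre ++ [last] ∧ 0 ≤ last ∧ last < (n : Int) := by
  induction n with
  | zero => omega
  | succ m ih =>
    by_cases hm : 1 ≤ m
    · obtain ⟨pre, last, heq, h0, hlt⟩ := ih hm
      have hpeel : mibCapIdx cs ((m : Int) + 1)
          = (if PySem.Chars.isupper (PySem.List.pyGetD cs (m : Int) ' ')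
                || PySem.Chars.isdigit (PySem.List.pyGetD cs (m : Int) ' ') then
              if PySem.List.pyGetD (mibCapIdx cs (m : Int)) (-1) 0 + 1 ≠ (m : Int) then
                mibCapIdx cs (m : Int) ++ [(m : Int)]
              else mibCapIdx cs (m : Int)
            else mibCapIdx cs (m : Int)) := by
        unfold mibCapIdx
        rw [PySem.List.pyRange_one_succ_right (by omega), List.foldl_append]
        rfl
      rw [show ((m + 1 : Nat) : Int) = (m : Int) + 1 by push_cast; ring, hpeel]
      split_ifs with hud hlast
      · exact ⟨mibCapIdx cs (m : Int), (m : Int), rfl, by omega, by omega⟩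
      · exact ⟨pre, last, heq, h0, by omega⟩
      · exact ⟨pre, last, heq, h0, by omega⟩
    · have hm0 : m = 0 := by omega
      subst hm0
      refine ⟨[], 0, ?_, by omega, by omega⟩
      unfold mibCapIdx
      rw [show ((1 : Nat) : Int) = 1 by rfl, PySem.List.pyRange_one_eq_nil (by omega)]
      rfl

-- ' '.join is nonempty when its last part is
lemma join_snoc_ne_nil (ws : List (List Char)) (t : List Char) (ht : t ≠ []) :
    PySem.Chars.join [' '] (ws ++ [t]) ≠ [] := by
  cases hws : ws with
  | nil => simpa [PySem.Chars.join_singleton] using ht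
  | cons w r => rw [← hws, join_snoc ws t (by simp [hws])]; simp

-- appending one character to the last part of a ' '.join
lemma join_snoc_append (ws : List (List Char)) (t : List Char) (c : Char) :
    PySem.Chars.join [' '] (ws ++ [t ++ [c]])
      = PySem.Chars.join [' '] (ws ++ [t]) ++ [c] := by
  cases hws : ws with
  | nil => simp [PySem.Chars.join_singleton]
  | cons w r =>
    rw [← hws, join_snoc ws _ (by simp [hws]), join_snoc ws t (by simp [hws])]
    simp

-- peeling the last step of A's first loop
lemma capIdx_peel (cs : List Char) (m : Nat) (hm : 1 ≤ m) :
    mibCapIdx cs ((m : Int) + 1)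
      = (if PySem.Chars.isupper (PySem.List.pyGetD cs (m : Int) ' ')
            || PySem.Chars.isdigit (PySem.List.pyGetD cs (m : Int) ' ') then
          if PySem.List.pyGetD (mibCapIdx cs (m : Int)) (-1) 0 + 1 ≠ (m : Int) then
            mibCapIdx cs (m : Int) ++ [(m : Int)]
          else mibCapIdx cs (m : Int)
        else mibCapIdx cs (m : Int)) := by
  unfold mibCapIdx
  rw [PySem.List.pyRange_one_succ_right (by omega), List.foldl_append]
  rfl

-- the fold invariant: B's automaton state after the first n characters, in terms
-- of A's boundary-index list for the same prefix
lemma altFold_inv (cs : List Char) (n : Nat) (h1 : 1 ≤ n) (hn : n ≤ cs.length) :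
    (cs.take n).foldl mibAltStep ([], 0, false)
      = (PySem.Chars.join [' ']
            (pvPairs cs (mibCapIdx cs (n : Int))
              ++ [PySem.List.slice cs
                    (some (PySem.List.pyGetD (mibCapIdx cs (n : Int)) (-1) 0))
                    (some (n : Int))]),
         ((PySem.Chars.join [' '] (pvPairs cs (mibCapIdx cs (n : Int)))).length : Int),
         decide (PySem.List.pyGetD (mibCapIdx cs (n : Int)) (-1) 0 = (n : Int) - 1)) := by
  induction n with
  | zero => omega
  | succ m ih =>
    by_cases hm : 1 ≤ m
    · have hmlt : m < cs.length := by omega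
      have ihv := ih hm (by omega)
      obtain ⟨pre, last, heq, h0, hlt⟩ := capIdx_shape cs m hm
      have hlast : PySem.List.pyGetD (mibCapIdx cs (m : Int)) (-1) 0 = last := by
        rw [heq]; exact pyGetD_last_snoc pre last 0
      have hcast : ((m + 1 : Nat) : Int) = (m : Int) + 1 := by push_cast; ring
      have htake : cs.take (m + 1) = cs.take m ++ [cs[m]] := by
        rw [List.take_add_one, List.getElem?_eq_getElem hmlt]; rfl
      have hchar : PySem.List.pyGetD cs (m : Int) ' ' = cs[m] := by
        rw [PySem.List.pyGetD_natCast, List.getD, List.getElem?_eq_getElem hmlt]; rfl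
      have htail_ne : PySem.List.slice cs (some last) (some (m : Int)) ≠ [] := by
        rw [PySem.List.slice_toNat cs h0 (by omega)]
        intro hnil
        have := congrArg List.length hnil
        simp at this
        omega
      have hbuf_ne : (PySem.Chars.join [' ']
          (pvPairs cs (pre ++ [last])
            ++ [PySem.List.slice cs (some last) (some (m : Int))])) ≠ [] :=
        join_snoc_ne_nil _ _ htail_ne
      have hmid : (m : Int) + 1 - 1 = (m : Int) := by ring
      rw [hcast, htake, List.foldl_append, ihv, List.foldl_cons, List.foldl_nil,
          capIdx_peel cs m hm, hchar, hlast, hmid, heq]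
      by_cases hud : (PySem.Chars.isupper cs[m] || PySem.Chars.isdigit cs[m]) = true
      · rw [if_pos hud]
        by_cases hne : last + 1 ≠ (m : Int)
        · -- boundary: a new word is emitted and the cut moves
          rw [if_pos hne, pvPairs_snoc cs pre last (m : Int),
              pyGetD_last_snoc (pre ++ [last]) ((m : Int)) 0, slice_one cs m hmlt,
              join_snoc (pvPairs cs (pre ++ [last])
                  ++ [PySem.List.slice cs (some last) (some (m : Int))]) [cs[m]]
                (by simp)]
          have hprevf : decide (last = (m : Int) - 1) = false := by rw [decide_eq_false_iff_not]; omega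
          simp [mibAltStep, hbuf_ne, hud, hprevf]
        · -- upper/digit right after the previous boundary: no new word
          rw [not_not] at hne
          rw [if_neg (by omega : ¬ last + 1 ≠ (m : Int)),
              pyGetD_last_snoc pre last 0,
              slice_extend cs last m h0 (by omega) hmlt, join_snoc_append]
          have hprevt : decide (last = (m : Int) - 1) = true := by rw [decide_eq_true_eq]; omega
          have hlastne : ¬ (last = (m : Int)) := by omega
          simp [mibAltStep, hbuf_ne, hud, hprevt, hlastne]
      · have hudf : (PySem.Chars.isupper cs[m] || PySem.Chars.isdigit cs[m]) = false :=
          Bool.eq_false_iff.mpr hud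
        rw [if_neg hud, pyGetD_last_snoc pre last 0,
            slice_extend cs last m h0 (by omega) hmlt, join_snoc_append]
        have hlastne : ¬ (last = (m : Int)) := by omega
        simp [mibAltStep, hbuf_ne, hudf, hlastne]
    · -- base case n = 1
      have hm0 : m = 0 := by omega
      subst hm0
      cases cs with
      | nil => simp at hn
      | cons c rest =>
        have hidx : mibCapIdx (c :: rest) ((1 : Nat) : Int) = [0] := by
          unfold mibCapIdx
          rw [show ((1 : Nat) : Int) = 1 from by norm_num,
              PySem.List.pyRange_one_eq_nil (by omega)]
          rfl
        rw [hidx]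
        rw [show List.take (0 + 1) (c :: rest) = [c] from rfl]
        simp [mibAltStep, pvPairs, PySem.Chars.join_singleton,
          show PySem.List.pyGetD [(0 : Int)] (-1) 0 = 0 from rfl]
        rw [PySem.List.slice_to (c :: rest) (by omega : (0 : Int) ≤ 1)]
        rfl

-- both programs compute ' '.join of the pair-words of the full index list
lemma alt_core (cs : List Char) :
    (let st := cs.foldl mibAltStep ([], 0, false)
     PySem.List.slice st.1 none (some st.2.1))
      = PySem.Chars.join [' '] (pvPairs cs (mibCapIdx cs (cs.length : Int))) := by
  cases hcs : cs with
  | nil => rfl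
  | cons c rest =>
    rw [← hcs]
    have h1 : 1 ≤ cs.length := by rw [hcs]; simp
    have hinv := altFold_inv cs cs.length h1 (le_refl _)
    rw [List.take_length] at hinv
    rw [hinv]
    simp only []
    rw [PySem.List.slice_to_natCast]
    rcases hws : pvPairs cs (mibCapIdx cs (cs.length : Int)) with _ | ⟨w, r⟩
    · simp [PySem.Chars.join_nil]
    · rw [← hws, join_snoc _ _ (by simp [hws])]
      exact List.take_left

-- ===== VERDICT (by name: the statement is the Claim_ definition above) =====
theorem mibWordSplit_spec : Claim_equal_mibWordSplit := by
  intro mib _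
  unfold Spec_mibWordSplit mibWordSplit mibWordSplit_alt
  by_cases hw : mib = "WiFi"
  · simp [hw]
  · simp only [hw, if_false]
    rw [joinIdx_eq, slice_pred_len, flatten_space_dropLast, alt_core]
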